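-- pv_equiv track=rewrite | github.com/hlt-mt/FBK-fairseq | examples/speech_to_text/scripts/ctc_align.py | split_token_list
-- ===== SOURCE A (Python) =====
-- def split_token_list(ltokens, split_chars=None):
--     """
--     Given a list of tokens and a set of splitting ids, it returns a list of list of tokens,
--     by splitting the original list when a splitting id is met.
--
--     >>> split_token_list([1, 2, 3, 4, 5], split_chars={3})
--     [[1, 2, 3], [4, 5]]
--     >>> split_token_list([1, 2, 3, 4, 5], split_chars={2, 3})
--     [[1, 2], [3], [4, 5]]
--     >>> split_token_list([1, 2, 3, 4, 5], split_chars={2, 3, 5})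
--     [[1, 2], [3], [4, 5]]
--     >>> split_token_list([1, 2, 3, 4, 5])
--     [[1, 2, 3, 4, 5]]
--     >>> split_token_list([1, 2, 3, 4, 5], split_chars={30})
--     [[1, 2, 3, 4, 5]]
--     >>> split_token_list([], split_chars={30})
--     [[]]
--     """
--     splits = [[]]
--     if split_chars is None:
--         split_chars = {}
--     for tok in ltokens:
--         splits[-1].append(tok)
--         if tok in split_chars:
--             splits.append([])
--     if len(splits[-1]) == 0 and len(splits) > 1:
--         splits.pop()
--     return splits
-- ===== SOURCE B (Python) =====
-- def split_token_list(ltokens, split_chars=None):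
--     chars = set() if split_chars is None else split_chars
--     idxs = [i for i, tok in enumerate(ltokens) if tok in chars]
--     result = []
--     start = 0
--     for i in idxs:
--         result.append(ltokens[start:i + 1])
--         start = i + 1
--     if start < len(ltokens) or not result:
--         result.append(ltokens[start:])
--     return result
-- ===== Notes on version B (the rewrite author's own statement) =====
-- stated objective: alternative
-- what changed: Replaces the single pass that mutates the last element of a nested list (and pops a trailing empty chunk) by a two-pass decomposition: first build the table of split positions, then slice the input between consecutive positions, appending the tail only when non-empty or when no chunk was produced.
import Mathlib
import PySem

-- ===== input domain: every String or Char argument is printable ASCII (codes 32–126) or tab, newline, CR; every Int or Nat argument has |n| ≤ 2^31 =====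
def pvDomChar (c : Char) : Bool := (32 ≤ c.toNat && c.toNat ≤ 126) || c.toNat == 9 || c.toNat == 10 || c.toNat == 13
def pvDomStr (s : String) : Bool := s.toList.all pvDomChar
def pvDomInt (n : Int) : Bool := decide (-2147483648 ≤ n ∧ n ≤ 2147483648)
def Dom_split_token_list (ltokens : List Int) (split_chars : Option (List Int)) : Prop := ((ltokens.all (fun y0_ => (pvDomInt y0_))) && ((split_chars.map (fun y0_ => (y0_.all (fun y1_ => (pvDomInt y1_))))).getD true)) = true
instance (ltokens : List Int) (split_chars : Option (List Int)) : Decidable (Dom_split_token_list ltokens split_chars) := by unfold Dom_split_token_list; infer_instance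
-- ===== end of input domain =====

-- Alternative decomposition: B builds the table of split positions first, then slices
-- between consecutive positions (same cost; the return values are proved equal everywhere).

-- ===== PORT A =====
-- splits[-1].append(tok); if tok in split_chars: splits.append([])
def pvStepA (sc : List Int) (splits : List (List Int)) (tok : Int) : List (List Int) :=
  let splits' := splits.dropLast ++ [splits.getLast! ++ [tok]]
  if tok ∈ sc then splits' ++ [[]] else splits'

def split_token_list (ltokens : List Int) (split_chars : Option (List Int)) : List (List Int) :=
  -- if split_chars is None: split_chars = {}
  let sc : List Int := match split_chars with | none => [] | some s => s
  let splits := ltokens.foldl (pvStepA sc) [[]]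
  -- if len(splits[-1]) == 0 and len(splits) > 1: splits.pop()
  if splits.getLast!.length = 0 ∧ 1 < splits.length then splits.dropLast else splits

-- ===== PORT B =====
-- result.append(ltokens[start:i+1]); start = i+1
def pvStepB (L : List Int) (acc : List (List Int) × Int) (i : Int) : List (List Int) × Int :=
  (acc.1 ++ [PySem.List.slice L (some acc.2) (some (i + 1))], i + 1)

def split_token_list_alt (ltokens : List Int) (split_chars : Option (List Int)) : List (List Int) :=
  let chars : List Int := match split_chars with | none => [] | some s => s
  -- idxs = [i for i, tok in enumerate(ltokens) if tok in chars]
  let idxs := (PySem.List.enumerate ltokens 0).filterMap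
    (fun p => if p.2 ∈ chars then some p.1 else none)
  let r := idxs.foldl (pvStepB ltokens) ([], 0)
  -- if start < len(ltokens) or not result: result.append(ltokens[start:])
  if r.2 < (ltokens.length : Int) ∨ r.1 = [] then
    r.1 ++ [PySem.List.slice ltokens (some r.2) none]
  else r.1

-- ===== PRECONDITION & SPEC =====
def Spec_split_token_list (ltokens : List Int) (split_chars : Option (List Int)) (out : List (List Int)) : Prop := out = split_token_list_alt ltokens split_chars
instance (ltokens : List Int) (split_chars : Option (List Int)) (out : List (List Int)) : Decidable (Spec_split_token_list ltokens split_chars out) := by unfold Spec_split_token_list; infer_instance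

-- ===== CLAIM (what is proved, stated in full; the proofs are below) =====
def Claim_equal_split_token_list : Prop := ∀ (ltokens : List Int) (split_chars : Option (List Int)), Dom_split_token_list ltokens split_chars → Spec_split_token_list ltokens split_chars (split_token_list ltokens split_chars)

-- ===== LEMMAS AND PROOFS =====

-- common skeleton: (completed chunks given the current partial chunk cur, trailing remainder)
def pvGoP (sc : List Int) : List Int → List Int → List (List Int) × List Int
  | [], cur => ([], cur)
  | t :: ts, cur =>
    if t ∈ sc then
      let p := pvGoP sc ts []
      ((cur ++ [t]) :: p.1, p.2)
    else pvGoP sc ts (cur ++ [t])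

lemma pvGoP_flatten (sc : List Int) : ∀ (ts cur : List Int),
    (pvGoP sc ts cur).1.flatten ++ (pvGoP sc ts cur).2 = cur ++ ts := by
  intro ts
  induction ts with
  | nil => intro cur; simp [pvGoP]
  | cons t ts ih =>
    intro cur
    by_cases h : t ∈ sc <;> simp [pvGoP, h, ih]

lemma pvGetLast!_concat (d : List (List Int)) (c : List Int) : (d ++ [c]).getLast! = c := by
  induction d with
  | nil => rfl
  | cons x d ih =>
    cases d with
    | nil => rfl
    | cons y d => simp only [List.cons_append] at ih ⊢; exact ih

lemma pvAinv (sc : List Int) : ∀ (ts : List Int) (d : List (List Int)) (c : List Int),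
    ts.foldl (pvStepA sc) (d ++ [c])
      = d ++ (pvGoP sc ts c).1 ++ [(pvGoP sc ts c).2] := by
  intro ts
  induction ts with
  | nil => intro d c; simp [pvGoP]
  | cons t ts ih =>
    intro d c
    simp only [List.foldl_cons, pvStepA, List.dropLast_concat, pvGetLast!_concat]
    by_cases h : t ∈ sc
    · simp only [h, if_pos]
      rw [show d ++ [c ++ [t]] ++ [[]] = (d ++ [c ++ [t]]) ++ [([] : List Int)] from rfl,
        ih (d ++ [c ++ [t]]) []]
      simp [pvGoP, h]
    · simp only [h, if_neg, not_false_iff]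
      rw [ih d (c ++ [t])]
      simp [pvGoP, h]

lemma pvBinv (L sc : List Int) : ∀ (ts cur : List Int) (s : Nat) (acc : List (List Int)),
    L.drop s = cur ++ ts → s ≤ L.length →
    ((PySem.List.enumerate ts ((s + cur.length : Nat) : Int)).filterMap
        (fun p => if p.2 ∈ sc then some p.1 else none)).foldl (pvStepB L) (acc, (s : Int))
      = (acc ++ (pvGoP sc ts cur).1,
         ((L.length - (pvGoP sc ts cur).2.length : Nat) : Int)) := by
  intro ts
  induction ts with
  | nil =>
    intro cur s acc hdrop hs
    have hlen : cur.length = L.length - s := by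
      have := congrArg List.length hdrop
      simp at this
      omega
    simp only [PySem.List.enumerate_nil, List.filterMap_nil, List.foldl_nil, pvGoP,
      List.append_nil]
    rw [hlen, Nat.sub_sub_self hs]
  | cons t ts ih =>
    intro cur s acc hdrop hs
    have hlen : L.length - s = cur.length + 1 + ts.length := by
      have := congrArg List.length hdrop
      simp at this
      omega
    have hsL : s + cur.length + 1 ≤ L.length := by omega
    have hdrop' : L.drop (s + cur.length + 1) = ts := by
      have h1 : L.drop (s + (cur.length + 1)) = (L.drop s).drop (cur.length + 1) := by
        rw [List.drop_drop]
      have h2 : (cur ++ t :: ts).drop (cur.length + 1) = ts := by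
        rw [show cur ++ t :: ts = (cur ++ [t]) ++ ts by simp,
          show cur.length + 1 = (cur ++ [t]).length by simp, List.drop_left]
      rw [show s + cur.length + 1 = s + (cur.length + 1) by omega, h1, hdrop, h2]
    have hcast : ((s + cur.length : Nat) : Int) + 1 = ((s + cur.length + 1 : Nat) : Int) := by
      push_cast; ring
    rw [PySem.List.enumerate_cons]
    by_cases h : t ∈ sc
    · rw [List.filterMap_cons_some (b := ((s + cur.length : Nat) : Int)) (by simp [h]),
        List.foldl_cons]
      have hslice : PySem.List.slice L (some (s : Int)) (some ((s + cur.length + 1 : Nat) : Int))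
          = cur ++ [t] := by
        rw [PySem.List.slice_natCast, hdrop,
          show s + cur.length + 1 - s = cur.length + 1 by omega, List.take_append]
        simp
      have hIH := ih [] (s + cur.length + 1) (acc ++ [cur ++ [t]]) (by simpa using hdrop') hsL
      simp only [List.length_nil, Nat.add_zero] at hIH
      simp only [pvStepB]
      rw [hcast, hslice, hIH]
      simp [pvGoP, h]
    · rw [List.filterMap_cons_none (by simp [h])]
      have hIH := ih (cur ++ [t]) s acc (by simpa using hdrop) hs
      simp only [List.length_append, List.length_cons, List.length_nil] at hIH
      rw [show s + (cur.length + (0 + 1)) = s + cur.length + 1 by omega] at hIH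
      rw [hcast, hIH]
      simp [pvGoP, h]

-- main case analysis, with the None default already resolved to a token list sc
lemma pvMain (L sc : List Int) :
    (if (L.foldl (pvStepA sc) [[]]).getLast!.length = 0 ∧ 1 < (L.foldl (pvStepA sc) [[]]).length
      then (L.foldl (pvStepA sc) [[]]).dropLast else L.foldl (pvStepA sc) [[]])
    = (if (((PySem.List.enumerate L 0).filterMap
            (fun p => if p.2 ∈ sc then some p.1 else none)).foldl (pvStepB L) ([], 0)).2
            < (L.length : Int)
          ∨ (((PySem.List.enumerate L 0).filterMap
            (fun p => if p.2 ∈ sc then some p.1 else none)).foldl (pvStepB L) ([], 0)).1 = []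
       then (((PySem.List.enumerate L 0).filterMap
            (fun p => if p.2 ∈ sc then some p.1 else none)).foldl (pvStepB L) ([], 0)).1
          ++ [PySem.List.slice L
              (some ((((PySem.List.enumerate L 0).filterMap
                (fun p => if p.2 ∈ sc then some p.1 else none)).foldl (pvStepB L) ([], 0)).2)) none]
       else (((PySem.List.enumerate L 0).filterMap
            (fun p => if p.2 ∈ sc then some p.1 else none)).foldl (pvStepB L) ([], 0)).1) := by
  set P := pvGoP sc L [] with hP
  have hA : L.foldl (pvStepA sc) [[]] = P.1 ++ [P.2] := by
    simpa using pvAinv sc L [] []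
  have hB : ((PySem.List.enumerate L 0).filterMap
        (fun p => if p.2 ∈ sc then some p.1 else none)).foldl (pvStepB L) ([], 0)
      = (P.1, ((L.length - P.2.length : Nat) : Int)) := by
    simpa using pvBinv L sc L [] 0 [] (by simp) (by simp)
  have hflat : P.1.flatten ++ P.2 = L := by simpa using pvGoP_flatten sc L []
  have hlenP : P.2.length ≤ L.length := by
    have h := congrArg List.length hflat
    rw [List.length_append] at h
    omega
  have hdropP : L.drop (L.length - P.2.length) = P.2 := by
    have hl : L.length - P.2.length = P.1.flatten.length := by
      have h := congrArg List.length hflat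
      rw [List.length_append] at h
      omega
    rw [hl, ← hflat, List.drop_left]
  rw [hA, hB]
  simp only [pvGetLast!_concat, List.dropLast_concat]
  have hslice : PySem.List.slice L (some ((L.length - P.2.length : Nat) : Int)) none
      = P.2 := by
    rw [PySem.List.slice_from_natCast, hdropP]
  by_cases h2 : P.2 = []
  · by_cases h1 : P.1 = []
    · -- empty input: A keeps the lone empty chunk, B appends the empty tail
      simp [h1, h2]
    · have hcond : ¬ (((L.length - P.2.length : Nat) : Int) < (L.length : Int) ∨ P.1 = []) := by
        simp [h1, h2]
      have hp : 0 < P.1.length := List.length_pos_of_ne_nil h1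
      simp [h2, h1, hp]
  · have h2l : 0 < P.2.length := List.length_pos_of_ne_nil h2
    have hcond : ((L.length - P.2.length : Nat) : Int) < (L.length : Int) ∨ P.1 = [] := by
      left; exact_mod_cast Nat.sub_lt_of_pos_le h2l hlenP
    simp [h2, hslice]
    intro hL
    rw [hL] at hflat
    exact absurd (List.append_eq_nil_iff.mp hflat).2 h2

-- ===== VERDICT (by name: the statement is the Claim_ definition above) =====
theorem split_token_list_spec : Claim_equal_split_token_list := by
  intro ltokens split_chars _
  unfold Spec_split_token_list split_token_list split_token_list_alt
  cases split_chars with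
  | none => exact pvMain ltokens []
  | some s => exact pvMain ltokens s
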